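-- pv_equiv track=rewrite | github.com/mofr/advent-of-code | 2016/day11.py | elevate
-- ===== SOURCE A (Python) =====
-- def elevate(input):
--     step_count = 0
--     item_count = 0
--     for line in input.split('\n'):
--         if item_count > 0:
--             step_count += 2*item_count - 3
--         item_count += line.count('generator')
--         item_count += line.count('chip')
--     return step_count
-- ===== SOURCE B (Python) =====
-- def elevate(input):
--     counts = [line.count('generator') + line.count('chip') for line in input.split('\n')]
--     prefixes = []
--     total = 0
--     for c in counts:
--         prefixes.append(total)
--         total += c
--     return sum(2*p - 3 for p in prefixes if p > 0)
-- ===== Notes on version B (the rewrite author's own statement) =====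
-- stated objective: alternative
-- what changed: Replaced the single fused accumulator loop by three separate passes: a per-line count list, an explicit prefix-sum pass, and a filtered closed-form summation sum(2*p-3 for positive prefixes).
import Mathlib
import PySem

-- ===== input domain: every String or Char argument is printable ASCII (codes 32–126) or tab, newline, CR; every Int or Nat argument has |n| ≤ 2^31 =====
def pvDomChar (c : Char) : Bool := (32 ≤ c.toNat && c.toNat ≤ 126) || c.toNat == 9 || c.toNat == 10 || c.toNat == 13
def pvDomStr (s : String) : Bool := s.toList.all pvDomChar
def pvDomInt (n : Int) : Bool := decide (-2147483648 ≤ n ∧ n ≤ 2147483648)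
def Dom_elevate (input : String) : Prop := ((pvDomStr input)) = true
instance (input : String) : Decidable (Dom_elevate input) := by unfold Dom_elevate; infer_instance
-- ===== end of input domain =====

-- B replaces A's fused accumulator loop by three passes (counts, prefix sums, filtered summation); objective: alternative decomposition.

-- ===== PORT A =====
-- single fold carrying (step_count, item_count)
def elevate (input : String) : Int :=
  (((PySem.Str.split? input "\n").getD []).foldl
    (fun (st : Int × Int) line =>
      let sc := if st.2 > 0 then st.1 + (2 * st.2 - 3) else st.1
      (sc, st.2 + (PySem.Str.count line "generator" : Int) + (PySem.Str.count line "chip" : Int)))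
    (0, 0)).1

-- ===== PORT B =====
def elevate_alt (input : String) : Int :=
  let counts := ((PySem.Str.split? input "\n").getD []).map
    (fun line => (PySem.Str.count line "generator" : Int) + (PySem.Str.count line "chip" : Int))
  let prefixes := (counts.foldl (fun (st : List Int × Int) c => (st.1 ++ [st.2], st.2 + c)) ([], 0)).1
  ((prefixes.filter (fun p => p > 0)).map (fun p => 2 * p - 3)).sum

-- ===== PRECONDITION & SPEC =====
def Spec_elevate (input : String) (out : Int) : Prop := out = elevate_alt input
instance (input : String) (out : Int) : Decidable (Spec_elevate input out) := by unfold Spec_elevate; infer_instance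

-- ===== CLAIM (what is proved, stated in full; the proofs are below) =====
def Claim_equal_elevate : Prop := ∀ (input : String), Dom_elevate input → Spec_elevate input (elevate input)

-- ===== LEMMAS AND PROOFS =====

-- the prefix-list fold emits its accumulator at the front
theorem pvPrefix_acc (l : List Int) (acc : List Int) (tot : Int) :
    (l.foldl (fun (st : List Int × Int) c => (st.1 ++ [st.2], st.2 + c)) (acc, tot)).1
      = acc ++ (l.foldl (fun (st : List Int × Int) c => (st.1 ++ [st.2], st.2 + c)) ([], tot)).1 := by
  induction l generalizing acc tot with
  | nil => simp
  | cons c l ih =>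
    simp only [List.foldl_cons]
    rw [ih (acc ++ [tot]), ih ([] ++ [tot])]
    simp

-- A's fused loop over counts equals B's prefix/filter/sum pipeline, for any state
theorem pvMain (l : List Int) (sc tot : Int) :
    (l.foldl (fun (st : Int × Int) c =>
        ((if st.2 > 0 then st.1 + (2 * st.2 - 3) else st.1), st.2 + c)) (sc, tot)).1
      = sc + ((((l.foldl (fun (st : List Int × Int) c => (st.1 ++ [st.2], st.2 + c)) ([], tot)).1).filter
          (fun p => p > 0)).map (fun p => 2 * p - 3)).sum := by
  induction l generalizing sc tot with
  | nil => simp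
  | cons c l ih =>
    simp only [List.foldl_cons]
    rw [ih, pvPrefix_acc l ([] ++ [tot]) (tot + c)]
    simp only [List.nil_append, List.singleton_append, List.filter_cons]
    by_cases h : tot > 0 <;> simp [h, List.map_cons] <;> ring

-- the fused fold over lines factors through the counts map
theorem pvFold_map (lines : List String) (sc tot : Int) :
    (lines.foldl
      (fun (st : Int × Int) line =>
        let s := if st.2 > 0 then st.1 + (2 * st.2 - 3) else st.1
        (s, st.2 + (PySem.Str.count line "generator" : Int) + (PySem.Str.count line "chip" : Int)))
      (sc, tot))
    = ((lines.map (fun line => (PySem.Str.count line "generator" : Int) + (PySem.Str.count line "chip" : Int))).foldl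
        (fun (st : Int × Int) c =>
          ((if st.2 > 0 then st.1 + (2 * st.2 - 3) else st.1), st.2 + c)) (sc, tot)) := by
  induction lines generalizing sc tot with
  | nil => rfl
  | cons line rest ih =>
    simp only [List.map_cons, List.foldl_cons]
    rw [← ih]
    ring_nf

-- ===== VERDICT (by name: the statement is the Claim_ definition above) =====
theorem elevate_spec : Claim_equal_elevate := by
  intro input _
  unfold Spec_elevate elevate elevate_alt
  rw [pvFold_map, pvMain]
  simp
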